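-- pv_equiv track=rewrite | github.com/atuanpham/HMM | hmm/hidden_markov_model.py | count_transition_pairs
-- ===== SOURCE A (Python) =====
-- def count_transition_pairs(state_sequences, start_, next_=None):
--
--     count = 0
--     for state_seq in state_sequences:
--         # The last state of each sequence will be ignored
--         for i in range(len(state_seq) - 1):
--
--             if (state_seq[i] == start_
--                     and (state_seq[i + 1] == next_ or next_ is None)):
--                 count += 1
--
--     return count
-- ===== SOURCE B (Python) =====
-- def count_transition_pairs(state_sequences, start_, next_=None):
--     # Pass 1: build a frequency table over ALL adjacent transition pairs.
--     table = {}
--     for seq in state_sequences: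
--         for pair in zip(seq, seq[1:]):
--             table[pair] = table.get(pair, 0) + 1
--     # Pass 2: answer the query from the table.
--     if next_ is not None:
--         return table.get((start_, next_), 0)
--     return sum(c for (a, _b), c in table.items() if a == start_)
-- ===== Notes on version B (the rewrite author's own statement) =====
-- stated objective: alternative
-- what changed: Replaces A's single pass with an inline per-index guard by two staged passes over a different data structure: first build a dict counting every adjacent transition pair, then answer the query from the table (one lookup for next_!=None, else a sum over table entries whose key starts with start_).
import Mathlib
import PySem

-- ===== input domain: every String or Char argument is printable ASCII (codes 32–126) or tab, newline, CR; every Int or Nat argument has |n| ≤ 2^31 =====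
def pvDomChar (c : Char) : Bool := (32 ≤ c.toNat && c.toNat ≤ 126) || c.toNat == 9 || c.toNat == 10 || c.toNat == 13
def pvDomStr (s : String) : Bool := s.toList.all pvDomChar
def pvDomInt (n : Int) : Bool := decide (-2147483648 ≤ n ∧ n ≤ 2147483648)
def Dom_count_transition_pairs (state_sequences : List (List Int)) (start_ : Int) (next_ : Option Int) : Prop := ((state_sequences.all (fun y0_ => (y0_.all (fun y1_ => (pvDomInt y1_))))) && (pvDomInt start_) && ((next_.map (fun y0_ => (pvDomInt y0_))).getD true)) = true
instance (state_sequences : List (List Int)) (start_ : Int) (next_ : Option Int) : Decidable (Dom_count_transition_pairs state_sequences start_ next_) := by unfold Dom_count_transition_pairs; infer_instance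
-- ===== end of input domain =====

-- B replaces A's single pass with an inline per-index guard by two staged passes: it first
-- builds a frequency table (dict) over ALL adjacent transition pairs, then answers the query
-- from the table (one lookup, or a sum over the keys starting with start_).

-- ===== PORT A =====
def count_transition_pairs (state_sequences : List (List Int)) (start_ : Int) (next_ : Option Int) : Int :=
  state_sequences.foldl (fun count state_seq =>
    (PySem.List.pyRange 0 (PySem.List.len state_seq - 1) 1).foldl (fun count i =>
      if (PySem.List.pyGetD state_seq i 0 == start_)
          && ((some (PySem.List.pyGetD state_seq (i + 1) 0) == next_) || next_.isNone)
      then count + 1 else count) count) 0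

-- ===== PORT B =====
def count_transition_pairs_alt (state_sequences : List (List Int)) (start_ : Int) (next_ : Option Int) : Int :=
  -- pass 1: table[pair] = table.get(pair, 0) + 1 over zip(seq, seq[1:]) for each seq
  let table : PySem.Dict (Int × Int) Int :=
    state_sequences.foldl (fun d seq =>
      (seq.zip (PySem.List.slice seq (some 1) none)).foldl
        (fun d pair => d.insert pair (d.getD pair 0 + 1)) d) PySem.Dict.empty
  -- pass 2: answer from the table
  match next_ with
  | some n => table.getD (start_, n) 0
  | none => table.items.foldl (fun s kv => if kv.1.1 == start_ then s + kv.2 else s) 0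

-- ===== PRECONDITION & SPEC =====
def Spec_count_transition_pairs (state_sequences : List (List Int)) (start_ : Int) (next_ : Option Int) (out : Int) : Prop := out = count_transition_pairs_alt state_sequences start_ next_
instance (state_sequences : List (List Int)) (start_ : Int) (next_ : Option Int) (out : Int) : Decidable (Spec_count_transition_pairs state_sequences start_ next_ out) := by unfold Spec_count_transition_pairs; infer_instance

-- ===== CLAIM (what is proved, stated in full; the proofs are below) =====
def Claim_equal_count_transition_pairs : Prop := ∀ (state_sequences : List (List Int)) (start_ : Int) (next_ : Option Int), Dom_count_transition_pairs state_sequences start_ next_ → Spec_count_transition_pairs state_sequences start_ next_ (count_transition_pairs state_sequences start_ next_)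

-- ===== LEMMAS AND PROOFS =====

-- A's per-pair test, as a predicate on an adjacent pair.
def pvPred (start_ : Int) (next_ : Option Int) (q : Int × Int) : Bool :=
  (q.1 == start_) && ((some q.2 == next_) || next_.isNone)

-- counting over indices range(len-1) = counting over the adjacent pairs zip(seq, seq.tail)
theorem pv_countP_range_zip (p : Int × Int → Bool) :
    ∀ (seq : List Int),
      (List.range (seq.length - 1)).countP (fun i => p (seq.getD i 0, seq.getD (i + 1) 0))
        = (seq.zip seq.tail).countP p := by
  intro seq
  induction seq with
  | nil => simp
  | cons x t ih =>
    cases t with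
    | nil => simp
    | cons y t' =>
      simp only [List.length_cons, Nat.add_sub_cancel, List.tail_cons, List.zip_cons_cons]
      rw [List.range_succ_eq_map, List.countP_cons, List.countP_map, List.countP_cons]
      have hcg : List.countP
            ((fun i => p ((x :: y :: t').getD i 0, (x :: y :: t').getD (i + 1) 0)) ∘ Nat.succ)
            (List.range t'.length)
          = List.countP (fun i => p ((y :: t').getD i 0, (y :: t').getD (i + 1) 0))
            (List.range t'.length) := by
        apply List.countP_congr
        intro i _
        simp [Function.comp, Nat.succ_eq_add_one]
      rw [hcg]
      have h := ih
      simp only [List.length_cons, Nat.add_sub_cancel, List.tail_cons] at h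
      rw [h]
      simp

-- A's inner index loop adds the number of adjacent pairs satisfying pvPred.
theorem pv_inner (start_ : Int) (next_ : Option Int) (seq : List Int) (c : Int) :
    (PySem.List.pyRange 0 (PySem.List.len seq - 1) 1).foldl (fun count i =>
        if (PySem.List.pyGetD seq i 0 == start_)
            && ((some (PySem.List.pyGetD seq (i + 1) 0) == next_) || next_.isNone)
        then count + 1 else count) c
      = c + (((seq.zip seq.tail).countP (pvPred start_ next_) : Nat) : Int) := by
  cases seq with
  | nil => simp [PySem.List.pyRange]
  | cons x t =>
    have hlen : PySem.List.len (x :: t) - 1 = ((t.length : Nat) : Int) := by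
      simp [PySem.List.len_eq]
    rw [hlen, PySem.List.pyRange_zero_natCast, List.foldl_map]
    trans ((List.range t.length).foldl (fun c i =>
      if pvPred start_ next_ ((x :: t).getD i 0, (x :: t).getD (i + 1) 0)
      then c + 1 else c) c)
    · apply PySem.List.foldl_congr_mem
      intro acc i _
      rw [show ((i : Int) + 1) = (((i + 1 : Nat) : Nat) : Int) by push_cast; ring,
        PySem.List.pyGetD_natCast, PySem.List.pyGetD_natCast]
      rfl
    · rw [PySem.List.foldl_if_add_one]
      have h := pv_countP_range_zip (pvPred start_ next_) (x :: t)
      simp only [List.length_cons, Nat.add_sub_cancel] at h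
      rw [h]

-- all adjacent pairs of all sequences, flattened
def pvAllPairs (sss : List (List Int)) : List (Int × Int) :=
  sss.flatMap (fun seq => seq.zip seq.tail)

-- summing per-sequence counts = counting over the flattened pair list
theorem pv_countP_flat (p : Int × Int → Bool) :
    ∀ (sss : List (List Int)),
      (sss.map (fun seq => (((seq.zip seq.tail).countP p : Nat) : Int))).sum
        = (((sss.flatMap (fun seq => seq.zip seq.tail)).countP p : Nat) : Int) := by
  intro sss
  induction sss with
  | nil => simp
  | cons s t ih => simp [List.countP_append, ih]

-- A = number of pairs in pvAllPairs satisfying pvPred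
theorem pv_A_eq (sss : List (List Int)) (start_ : Int) (next_ : Option Int) :
    count_transition_pairs sss start_ next_
      = (((pvAllPairs sss).countP (pvPred start_ next_) : Nat) : Int) := by
  unfold count_transition_pairs
  have h1 : sss.foldl (fun count state_seq =>
      (PySem.List.pyRange 0 (PySem.List.len state_seq - 1) 1).foldl (fun count i =>
        if (PySem.List.pyGetD state_seq i 0 == start_)
            && ((some (PySem.List.pyGetD state_seq (i + 1) 0) == next_) || next_.isNone)
        then count + 1 else count) count) 0
      = sss.foldl (fun c seq =>
          c + (((seq.zip seq.tail).countP (pvPred start_ next_) : Nat) : Int)) 0 := by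
    apply PySem.List.foldl_congr_mem
    intro acc seq _
    exact pv_inner start_ next_ seq acc
  rw [h1, PySem.List.foldl_add, zero_add]
  unfold pvAllPairs
  exact pv_countP_flat (pvPred start_ next_) sss

-- nested pair loop = one flat loop over pvAllPairs
theorem pv_nested_foldl {β : Type} (g : β → (Int × Int) → β) :
    ∀ (sss : List (List Int)) (d : β),
      sss.foldl (fun d seq => (seq.zip seq.tail).foldl g d) d
        = (pvAllPairs sss).foldl g d := by
  intro sss
  induction sss with
  | nil => intro d; simp [pvAllPairs]
  | cons s t ih => intro d; simp [pvAllPairs, List.foldl_append, ih, List.flatMap_cons]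

-- B's table is Counter(pvAllPairs)
theorem pv_table_eq (sss : List (List Int)) :
    sss.foldl (fun d seq =>
        (seq.zip (PySem.List.slice seq (some 1) none)).foldl
          (fun d pair => d.insert pair (d.getD pair 0 + 1)) d) PySem.Dict.empty
      = PySem.Dict.counter (pvAllPairs sss) := by
  simp only [PySem.List.slice_from_one]
  rw [pv_nested_foldl]
  exact PySem.Dict.foldl_insert_getD_add_one_eq_counter _

-- the sum-if loop is a sum of a map
theorem pv_foldl_if_sum (start_ : Int) :
    ∀ (l : List ((Int × Int) × Int)) (s : Int),
      l.foldl (fun s kv => if kv.1.1 == start_ then s + kv.2 else s) s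
        = s + (l.map (fun kv => if kv.1.1 == start_ then kv.2 else 0)).sum := by
  intro l
  induction l with
  | nil => intro s; simp
  | cons kv t ih =>
    intro s
    simp only [List.foldl_cons, List.map_cons, List.sum_cons, ih]
    split_ifs <;> ring

-- splitting a count by equality with a fixed key
theorem pv_countP_split (p : Int × Int → Bool) (k : Int × Int) :
    ∀ (L : List (Int × Int)),
      L.countP p
        = (if p k then L.count k else 0) + (L.filter (fun x => !(x == k))).countP p := by
  intro L
  induction L with
  | nil => simp
  | cons x t ih =>
    by_cases hx : x = k
    · subst hx
      by_cases hp : p x = true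
      · simp [List.count_cons, hp, ih]; omega
      · simp only [Bool.not_eq_true] at hp
        simp [List.count_cons, hp, ih]
    · have hbe : (x == k) = false := by simp [hx]
      simp only [List.countP_cons, List.count_cons, hbe, List.filter_cons, Bool.not_false,
        if_true, List.countP_cons, ih]
      split_ifs <;> simp_all <;> omega

-- summing per-key counts over a nodup key list covering L = countP over L
theorem pv_sum_counts (p : Int × Int → Bool) :
    ∀ (keys L : List (Int × Int)), keys.Nodup → (∀ x ∈ L, x ∈ keys) →
      (keys.map (fun k => if p k then (L.count k : Int) else 0)).sum
        = ((L.countP p : Nat) : Int) := by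
  intro keys
  induction keys with
  | nil =>
    intro L _ hcov
    cases L with
    | nil => simp
    | cons x t => exact absurd (hcov x (by simp)) (by simp)
  | cons k ks ih =>
    intro L hnd hcov
    have hndk : ks.Nodup := (List.nodup_cons.mp hnd).2
    have hkn : k ∉ ks := (List.nodup_cons.mp hnd).1
    set L' := L.filter (fun x => !(x == k)) with hL'
    have hcov' : ∀ x ∈ L', x ∈ ks := by
      intro x hx
      have hxm := List.mem_of_mem_filter hx
      have hxk : ¬ (x == k) = true := by
        have := List.of_mem_filter hx; simpa using this
      have := hcov x hxm
      simp only [List.mem_cons] at this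
      rcases this with h | h
      · exact absurd (by simp [h]) hxk
      · exact h
    have hcnt : ∀ k' ∈ ks, L.count k' = L'.count k' := by
      intro k' hk'
      have hne : k' ≠ k := fun h => hkn (h ▸ hk')
      rw [hL', List.count_filter]
      simp [hne]
    have hmap : (ks.map (fun k' => if p k' then (L.count k' : Int) else 0))
        = ks.map (fun k' => if p k' then (L'.count k' : Int) else 0) := by
      apply List.map_congr_left
      intro k' hk'
      rw [hcnt k' hk']
    rw [List.map_cons, List.sum_cons, hmap, ih L' hndk hcov',
      pv_countP_split p k L]
    push_cast
    split_ifs <;> ring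

-- ===== VERDICT (by name: the statement is the Claim_ definition above) =====
theorem count_transition_pairs_spec : Claim_equal_count_transition_pairs := by
  intro sss start_ next_ _
  unfold Spec_count_transition_pairs
  rw [pv_A_eq]
  unfold count_transition_pairs_alt
  simp only [pv_table_eq]
  cases next_ with
  | some n =>
    simp only []
    rw [PySem.Dict.getD_counter]
    congr 1
    rw [List.count_eq_countP]
    apply List.countP_congr
    intro q _
    cases q with
    | mk a b => simp [pvPred]
  | none =>
    simp only []
    rw [PySem.Dict.items_counter, pv_foldl_if_sum, zero_add, List.map_map]
    have hmc : ((PySem.Set.ofList (pvAllPairs sss)).map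
          ((fun kv : (Int × Int) × Int => if kv.1.1 == start_ then kv.2 else 0)
            ∘ fun k => (k, ((pvAllPairs sss).count k : Int))))
        = (PySem.Set.ofList (pvAllPairs sss)).map
            (fun k => if pvPred start_ none k then ((pvAllPairs sss).count k : Int) else 0) := by
      apply List.map_congr_left
      intro k _
      simp [Function.comp, pvPred]
    rw [hmc, pv_sum_counts (pvPred start_ none) (PySem.Set.ofList (pvAllPairs sss)) (pvAllPairs sss)
      (PySem.Set.nodup_ofList _) (fun x hx => (PySem.Set.mem_ofList _ _).mpr hx)]
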